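-- pv_equiv track=rewrite | github.com/sophkim/aix-algo | JY/Code/09.py | solution
-- ===== SOURCE A (Python) =====
-- def solution(s):
--     l = len(s)
--     answer = l
--     half = l // 2
--
--     for i in range(1, half + 1):
--         sentence = ""
--
--         prev = s[0:i]
--         count = 1
--
--         for j in range(i, l, i):
--             if prev == s[j:j+i]:
--                 count += 1
--             else:
--                 if count == 1 :
--                     sentence += prev
--                 else:
--                     sentence += str(count) + prev
--                 prev = s[j:j+i]
--                 count = 1
--
--         if count == 1 :
--             sentence += prev
--         else:
--             sentence += str(count) + prev
--
--         answer = min(answer, len(sentence))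
--     return answer
-- ===== SOURCE B (Python) =====
-- def solution(s):
--     l = len(s)
--     best = l
--     for i in range(1, l // 2 + 1):
--         # prefix sums of character matches at distance i: p[t] = #{j < t : s[j] == s[j+i]}
--         acc = 0
--         p = [0]
--         for j in range(l - i):
--             acc += 1 if s[j] == s[j + i] else 0
--             p.append(acc)
--         m = l // i          # number of full chunks
--         r = l % i           # partial tail chunk (its own run: its length differs)
--         cost = r
--         run = 1
--         for k in range(1, m):
--             # chunk k-1 == chunk k  iff  all i character matches in the window hold
--             if p[k * i] - p[(k - 1) * i] == i:
--                 run += 1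
--             else:
--                 cost += i + (len(str(run)) if run > 1 else 0)
--                 run = 1
--         cost += i + (len(str(run)) if run > 1 else 0)
--         best = min(best, cost)
--     return best
-- ===== Notes on version B (the rewrite author's own statement) =====
-- stated objective: alternative
-- what changed: B never builds or compares chunk substrings: per chunk size i it builds a prefix-sum table of character matches at distance i, decides equality of adjacent chunks by one window test p[k*i]-p[(k-1)*i]==i, and folds integer (cost, run) state with a closed-form tail-chunk term, instead of A's slicing chunks and concatenating a compressed string to measure.
import Mathlib
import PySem

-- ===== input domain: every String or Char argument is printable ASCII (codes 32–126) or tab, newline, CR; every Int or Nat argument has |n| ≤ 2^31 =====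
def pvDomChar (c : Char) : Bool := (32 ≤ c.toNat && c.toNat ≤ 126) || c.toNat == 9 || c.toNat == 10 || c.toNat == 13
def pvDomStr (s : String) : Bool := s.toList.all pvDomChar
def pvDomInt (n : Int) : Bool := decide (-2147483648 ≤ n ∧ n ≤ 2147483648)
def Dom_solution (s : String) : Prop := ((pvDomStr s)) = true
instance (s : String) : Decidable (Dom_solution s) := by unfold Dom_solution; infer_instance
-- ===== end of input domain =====

-- B replaces A's substring slicing/RLE over chunk strings by a per-size prefix-sum table of
-- character matches at distance i (chunk equality becomes one window test on the table) and pure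
-- integer run counting; no chunk substring is ever built (objective: alternative).

-- ===== PORT A =====
-- A's inner loop state: (sentence, prev, count); strings are carried as List Char (PySem convention).
def solution (s : String) : Int :=
  let l : Int := PySem.Str.len s
  let answer : Int := l
  let half : Int := PySem.Int.floordiv l 2
  (PySem.List.pyRange 1 (half + 1) 1).foldl (fun answer i =>
    let st :=
      (PySem.List.pyRange i l i).foldl
        (fun (st : List Char × List Char × Int) j =>
          let sentence := st.1
          let prev := st.2.1
          let count := st.2.2
          if prev = PySem.List.slice s.toList (some j) (some (j + i)) then
            (sentence, prev, count + 1)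
          else
            let sentence :=
              if count = 1 then sentence ++ prev
              else sentence ++ PySem.Int.toChars count ++ prev
            (sentence, PySem.List.slice s.toList (some j) (some (j + i)), 1))
        (([] : List Char), PySem.List.slice s.toList (some 0) (some i), (1 : Int))
    let sentence :=
      if st.2.2 = 1 then st.1 ++ st.2.1
      else st.1 ++ PySem.Int.toChars st.2.2 ++ st.2.1
    min answer ((sentence.length : Int))) answer

-- ===== PORT B =====
-- p is the prefix-sum list of character matches at distance i (p[t] = #{j < t : s[j] == s[j+i]});
-- run-length state is the pure integer pair (cost, run).  Python's p[k*i] indexing is ported with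
-- pyGetD (default 0): the index is provably in range, where pyGetD agrees with Python's p[...].
def solution_alt (s : String) : Int :=
  let l : Int := PySem.Str.len s
  let best : Int := l
  (PySem.List.pyRange 1 (PySem.Int.floordiv l 2 + 1) 1).foldl (fun best i =>
    let ap : Int × List Int :=
      (PySem.List.pyRange 0 (l - i) 1).foldl
        (fun (st : Int × List Int) j =>
          let acc := st.1 + (if PySem.Str.pyGet? s j = PySem.Str.pyGet? s (j + i) then (1 : Int) else 0)
          (acc, st.2 ++ [acc]))
        ((0 : Int), ([0] : List Int))
    let p := ap.2
    let m : Int := PySem.Int.floordiv l i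
    let r : Int := PySem.Int.mod l i
    let st : Int × Int :=
      (PySem.List.pyRange 1 m 1).foldl
        (fun (st : Int × Int) k =>
          if PySem.List.pyGetD p (k * i) 0 - PySem.List.pyGetD p ((k - 1) * i) 0 = i then
            (st.1, st.2 + 1)
          else
            (st.1 + i + (if 1 < st.2 then ((PySem.Int.toChars st.2).length : Int) else 0), 1))
        (r, 1)
    min best (st.1 + i + (if 1 < st.2 then ((PySem.Int.toChars st.2).length : Int) else 0))) best

-- ===== PRECONDITION & SPEC =====
def Spec_solution (s : String) (out : Int) : Prop := out = solution_alt s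
instance (s : String) (out : Int) : Decidable (Spec_solution s out) := by unfold Spec_solution; infer_instance

-- ===== CLAIM (what is proved, stated in full; the proofs are below) =====
def Claim_equal_solution : Prop := ∀ (s : String), Dom_solution s → Spec_solution s (solution s)

-- ===== LEMMAS AND PROOFS =====

-- chunk k of size iN (Python s[k*i:(k+1)*i])
def pvChunk (cs : List Char) (iN k : Nat) : List Char := (cs.drop (k * iN)).take iN

-- number of j < t with cs[j] == cs[j+iN]
def pvCnt (cs : List Char) (iN t : Nat) : Nat :=
  (List.range t).countP (fun j => cs[j]? == cs[j + iN]?)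

-- len(str(run)) if run > 1 else 0
def pvDig (c : Int) : Int := if 1 < c then ((PySem.Int.toChars c).length : Int) else 0

-- A's inner step, re-expressed over the chunk index k
def pvAS (cs : List Char) (iN : Nat) (st : List Char × List Char × Int) (k : Int) :
    List Char × List Char × Int :=
  if st.2.1 = pvChunk cs iN k.toNat then (st.1, st.2.1, st.2.2 + 1)
  else ((if st.2.2 = 1 then st.1 ++ st.2.1 else st.1 ++ PySem.Int.toChars st.2.2 ++ st.2.1),
        pvChunk cs iN k.toNat, 1)

-- B's inner step, with the window test rewritten as chunk equality
def pvBS (cs : List Char) (iN : Nat) (st : Int × Int) (k : Int) : Int × Int :=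
  if pvChunk cs iN (k.toNat - 1) = pvChunk cs iN k.toNat then (st.1, st.2 + 1)
  else (st.1 + (iN : Int) + pvDig st.2, 1)

theorem pvChunk_length (cs : List Char) (iN k : Nat) :
    (pvChunk cs iN k).length = min iN (cs.length - k * iN) := by
  simp [pvChunk]

theorem pvChunk_getElem? (cs : List Char) (iN k t : Nat) (ht : t < iN) :
    (pvChunk cs iN k)[t]? = cs[k * iN + t]? := by
  simp [pvChunk, ht, List.getElem?_drop]

theorem pvSlice_chunk (cs : List Char) (iN k : Nat) :
    PySem.List.slice cs (some ((k : Int) * (iN : Int))) (some ((k : Int) * (iN : Int) + (iN : Int)))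
      = pvChunk cs iN k := by
  have h : ((k * iN : Nat) : Int) = (k : Int) * (iN : Int) := by push_cast; ring
  rw [← h, PySem.List.slice_natCast_add]
  rfl

theorem pvChunk_eq_iff (cs : List Char) (iN k : Nat) :
    (pvChunk cs iN (k - 1) = pvChunk cs iN k) ↔
      ∀ t < iN, cs[(k - 1) * iN + t]? = cs[k * iN + t]? := by
  constructor
  · intro he t ht
    rw [← pvChunk_getElem? cs iN (k - 1) t ht, ← pvChunk_getElem? cs iN k t ht, he]
  · intro he
    apply List.ext_getElem?
    intro t
    by_cases ht : t < iN
    · rw [pvChunk_getElem? cs iN (k - 1) t ht, pvChunk_getElem? cs iN k t ht]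
      exact he t ht
    · have l1 : (pvChunk cs iN (k - 1)).length ≤ t := by rw [pvChunk_length]; omega
      have l2 : (pvChunk cs iN k).length ≤ t := by rw [pvChunk_length]; omega
      rw [List.getElem?_eq_none l1, List.getElem?_eq_none l2]

theorem pvCond_iff (cs : List Char) (iN k : Nat) (hk : 1 ≤ k) :
    ((pvCnt cs iN (k * iN) : Int) - (pvCnt cs iN ((k - 1) * iN) : Int) = (iN : Int)) ↔
      pvChunk cs iN (k - 1) = pvChunk cs iN k := by
  have hk1 : k - 1 + 1 = k := by omega
  have hsplit : k * iN = (k - 1) * iN + iN := by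
    calc k * iN = (k - 1 + 1) * iN := by rw [hk1]
    _ = (k - 1) * iN + iN := by ring
  have hcnt : pvCnt cs iN (k * iN) =
      pvCnt cs iN ((k - 1) * iN) +
        ((List.range iN).map ((k - 1) * iN + ·)).countP (fun j => cs[j]? == cs[j + iN]?) := by
    unfold pvCnt
    rw [hsplit, List.range_add, List.countP_append]
  have hlenmap : ((List.range iN).map ((k - 1) * iN + ·)).length = iN := by simp
  have hle : ((List.range iN).map ((k - 1) * iN + ·)).countP (fun j => cs[j]? == cs[j + iN]?) ≤ iN :=
    le_trans List.countP_le_length (le_of_eq hlenmap)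
  rw [pvChunk_eq_iff cs iN k, hcnt]
  constructor
  · intro h t ht
    have hc : ((List.range iN).map ((k - 1) * iN + ·)).countP (fun j => cs[j]? == cs[j + iN]?)
        = ((List.range iN).map ((k - 1) * iN + ·)).length := by omega
    have hall := (List.countP_eq_length).1 hc
    have hmem : (k - 1) * iN + t ∈ (List.range iN).map ((k - 1) * iN + ·) := by
      simp only [List.mem_map, List.mem_range]
      exact ⟨t, ht, rfl⟩
    have h2 := hall _ hmem
    rw [beq_iff_eq] at h2
    have hidx : (k - 1) * iN + t + iN = k * iN + t := by omega
    rw [hidx] at h2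
    exact h2
  · intro h
    have hall : ∀ x ∈ (List.range iN).map ((k - 1) * iN + ·), (cs[x]? == cs[x + iN]?) = true := by
      intro x hx
      simp only [List.mem_map, List.mem_range] at hx
      obtain ⟨t, ht, rfl⟩ := hx
      rw [beq_iff_eq]
      have hidx : (k - 1) * iN + t + iN = k * iN + t := by omega
      rw [hidx]
      exact h t ht
    have := (List.countP_eq_length).2 hall
    rw [hlenmap] at this
    omega

-- the prefix-sum fold of B computes pvCnt
theorem pvP_spec (s : String) (iN : Nat) (n : Nat) :
    (PySem.List.pyRange 0 (n : Int) 1).foldl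
      (fun (st : Int × List Int) j =>
        let acc := st.1 + (if PySem.Str.pyGet? s j = PySem.Str.pyGet? s (j + (iN : Int)) then (1 : Int) else 0)
        (acc, st.2 ++ [acc]))
      ((0 : Int), ([0] : List Int))
    = ((pvCnt s.toList iN n : Int),
       (List.range (n + 1)).map (fun t => (pvCnt s.toList iN t : Int))) := by
  induction n with
  | zero =>
    simp only [Nat.cast_zero]
    rw [PySem.List.pyRange_one_eq_nil (le_refl 0)]
    simp [pvCnt]
  | succ n ih =>
    rw [show ((n + 1 : Nat) : Int) = (n : Int) + 1 by push_cast; ring,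
      PySem.List.pyRange_one_succ_right (Int.natCast_nonneg n), List.foldl_append, ih]
    simp only [List.foldl_cons, List.foldl_nil]
    have hsucc : pvCnt s.toList iN (n + 1) =
        pvCnt s.toList iN n + (if s.toList[n]? = s.toList[n + iN]? then 1 else 0) := by
      unfold pvCnt
      rw [List.range_succ, List.countP_append]
      by_cases h : s.toList[n]? = s.toList[n + iN]? <;> simp [h]
    have hg2 : PySem.Str.pyGet? s ((n : Int) + (iN : Int)) = s.toList[n + iN]? := by
      rw [show ((n : Int) + (iN : Int)) = ((n + iN : Nat) : Int) by push_cast; ring,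
        PySem.Str.pyGet?_natCast]
    rw [PySem.Str.pyGet?_natCast, hg2]
    by_cases h : s.toList[n]? = s.toList[n + iN]? <;>
      simp [h, hsucc, List.range_succ]

-- range(i, l, i) enumerates k * i for k = 1 .. (l-1)//i
theorem pvRange_mul (i l : Int) (hi : 0 < i) (hil : i < l) :
    PySem.List.pyRange i l i = (PySem.List.pyRange 1 ((l - 1) / i + 1) 1).map (· * i) := by
  rw [PySem.List.pyRange_of_pos i l hi, if_pos hil, PySem.List.pyRange_one]
  rw [show l - i + i - 1 = l - 1 by ring, show (l - 1) / i + 1 - 1 = (l - 1) / i by ring]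
  rw [List.map_map]
  apply List.map_congr_left
  intro k _
  simp only [Function.comp]
  ring

-- parallel invariant between A's chunk fold and B's integer fold
theorem pvPar (cs : List Char) (iN : Nat) (hi : 0 < iN) (m r : Int)
    (hm : m * (iN : Int) ≤ (cs.length : Int)) :
    ∀ u : Int, 1 ≤ u → u ≤ m →
      ((((PySem.List.pyRange 1 u 1).foldl (pvAS cs iN) ([], pvChunk cs iN 0, 1)).1.length : Int) + r
          = ((PySem.List.pyRange 1 u 1).foldl (pvBS cs iN) (r, 1)).1)
      ∧ ((PySem.List.pyRange 1 u 1).foldl (pvAS cs iN) ([], pvChunk cs iN 0, 1)).2.1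
          = pvChunk cs iN (u - 1).toNat
      ∧ ((PySem.List.pyRange 1 u 1).foldl (pvAS cs iN) ([], pvChunk cs iN 0, 1)).2.2
          = ((PySem.List.pyRange 1 u 1).foldl (pvBS cs iN) (r, 1)).2
      ∧ 1 ≤ ((PySem.List.pyRange 1 u 1).foldl (pvBS cs iN) (r, 1)).2 := by
  intro u hu
  induction u, hu using Int.le_induction with
  | base =>
    intro _
    rw [PySem.List.pyRange_one_eq_nil (le_refl 1)]
    refine ⟨by simp, by norm_num, rfl, le_refl 1⟩
  | succ u hu ih =>
    intro hum
    obtain ⟨IH1, IH2, IH3, IH4⟩ := ih (by omega)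
    rw [PySem.List.pyRange_one_succ_right hu, List.foldl_append, List.foldl_append]
    simp only [List.foldl_cons, List.foldl_nil]
    set A' := (PySem.List.pyRange 1 u 1).foldl (pvAS cs iN) ([], pvChunk cs iN 0, 1) with hA'
    set B' := (PySem.List.pyRange 1 u 1).foldl (pvBS cs iN) (r, 1) with hB'
    have huN : ((u.toNat : Nat) : Int) = u := Int.toNat_of_nonneg (by omega)
    have hu1 : (u - 1).toNat = u.toNat - 1 := by omega
    have huN1 : 1 ≤ u.toNat := by omega
    have hfull : u.toNat * iN + iN ≤ cs.length := by
      have h1 : (u + 1) * (iN : Int) ≤ m * (iN : Int) :=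
        mul_le_mul_of_nonneg_right (by omega) (by positivity)
      have h2 : ((u.toNat * iN + iN : Nat) : Int) = (u + 1) * (iN : Int) := by
        push_cast [huN]; ring
      have h3 : ((u.toNat * iN + iN : Nat) : Int) ≤ ((cs.length : Nat) : Int) := by
        rw [h2]; exact le_trans h1 hm
      exact_mod_cast h3
    have hprevfull : (u.toNat - 1) * iN + iN ≤ cs.length := by
      have := Nat.mul_le_mul_right iN (Nat.sub_le u.toNat 1)
      omega
    have hprevlen : A'.2.1.length = iN := by
      rw [IH2, hu1, pvChunk_length]
      omega
    simp only [pvAS, pvBS, IH2, hu1]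
    have hplen2 : (pvChunk cs iN (u.toNat - 1)).length = iN := by
      rw [pvChunk_length]; omega
    by_cases hc : pvChunk cs iN (u.toNat - 1) = pvChunk cs iN u.toNat
    · rw [if_pos hc, if_pos hc]
      refine ⟨IH1, ?_, by rw [IH3], by omega⟩
      rw [show (u + 1 - 1).toNat = u.toNat by omega]
      exact hc
    · rw [if_neg hc, if_neg hc]
      refine ⟨?_, by rw [show (u + 1 - 1).toNat = u.toNat by omega], rfl, le_refl 1⟩
      rw [← IH3]
      by_cases h1 : A'.2.2 = 1
      · rw [if_pos h1, h1, show pvDig 1 = 0 from by norm_num [pvDig]]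
        rw [List.length_append, hplen2]
        simp only [Nat.cast_add]
        omega
      · have hge : 1 ≤ A'.2.2 := by rw [IH3]; exact IH4
        have hgt : 1 < A'.2.2 := lt_of_le_of_ne hge (Ne.symm h1)
        rw [if_neg h1]
        simp only [pvDig, if_pos hgt]
        rw [List.length_append, List.length_append, hplen2]
        simp only [Nat.cast_add]
        omega

-- ===== VERDICT (by name: the statement is the Claim_ definition above) =====
theorem solution_spec : Claim_equal_solution := by
  intro s _
  show solution s = solution_alt s
  simp only [solution, solution_alt]
  refine PySem.List.foldl_congr_mem _ _ _ _ ?_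
  intro acc i hmem
  rw [PySem.List.mem_pyRange_one] at hmem
  obtain ⟨h1, h2⟩ := hmem
  rw [PySem.Str.len_eq] at h2 ⊢
  rw [PySem.Int.floordiv_eq_ediv_of_pos (by norm_num : (0:Int) < 2)] at h2
  set L := s.toList.length with hLdef
  have hi0 : 0 < i := by omega
  have h2i : 2 * i ≤ (L : Int) := by
    have hle2 : i ≤ (L : Int) / 2 := by omega
    rw [Int.le_ediv_iff_mul_le (by norm_num : (0:Int) < 2)] at hle2
    omega
  obtain ⟨iN, rfl⟩ := Int.eq_ofNat_of_zero_le (le_of_lt hi0)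
  have hiN : 0 < iN := by exact_mod_cast hi0
  have h2iN : 2 * iN ≤ L := by exact_mod_cast h2i
  congr 1
  -- abbreviations for the Nat quotient/remainder
  set qN := L / iN with hqdef
  set rN := L % iN with hrdef
  have hQR : iN * qN + rN = L := Nat.div_add_mod L iN
  have hrlt : rN < iN := Nat.mod_lt _ hiN
  have hq2 : 2 ≤ qN := (Nat.le_div_iff_mul_le hiN).2 h2iN
  have hcomm : qN * iN = iN * qN := Nat.mul_comm _ _
  have hqL : qN * iN ≤ L := by omega
  have hmcast : ((qN : Nat) : Int) * ((iN : Nat) : Int) ≤ ((L : Nat) : Int) := by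
    have : ((qN * iN : Nat) : Int) ≤ ((L : Nat) : Int) := by exact_mod_cast hqL
    push_cast at this
    exact this
  have hne0 : ((iN : Nat) : Int) ≠ 0 := by exact_mod_cast hiN.ne'
  have hcast : ((L : Nat) : Int) = ((iN : Nat) : Int) * ((qN : Nat) : Int) + ((rN : Nat) : Int) := by
    exact_mod_cast hQR.symm
  -- A: re-index the inner fold over chunk indices k = 1 .. (L-1)//iN
  rw [pvRange_mul (iN : Int) (L : Int) (by exact_mod_cast hiN) (by omega), List.foldl_map]
  -- A: initial prev is chunk 0
  rw [show PySem.List.slice s.toList (some 0) (some (iN : Int)) = pvChunk s.toList iN 0 by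
    rw [PySem.List.slice_zero_start, PySem.List.slice_to_natCast]
    simp [pvChunk]]
  -- A: the re-indexed step is pvAS
  rw [PySem.List.foldl_congr_mem _ _ (pvAS s.toList iN) _ (by
    intro st k hk
    rw [PySem.List.mem_pyRange_one] at hk
    obtain ⟨kN, rfl⟩ := Int.eq_ofNat_of_zero_le (by omega : (0:Int) ≤ k)
    rw [pvSlice_chunk]
    simp [pvAS])]
  -- B: prefix-sum fold computes pvCnt
  rw [show ((L : Nat) : Int) - ((iN : Nat) : Int) = ((L - iN : Nat) : Int) by omega]
  rw [pvP_spec s iN (L - iN)]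
  dsimp only
  -- B: floordiv/mod on casts
  rw [show PySem.Int.floordiv ((L : Nat) : Int) ((iN : Nat) : Int) = ((qN : Nat) : Int) from
    PySem.Int.floordiv_natCast L iN]
  rw [show PySem.Int.mod ((L : Nat) : Int) ((iN : Nat) : Int) = ((rN : Nat) : Int) from
    PySem.Int.mod_natCast L iN]
  -- B: the window test is chunk equality, i.e. the step is pvBS
  rw [PySem.List.foldl_congr_mem _ _ (pvBS s.toList iN) _ (by
    intro st k hk
    rw [PySem.List.mem_pyRange_one] at hk
    obtain ⟨kN, rfl⟩ := Int.eq_ofNat_of_zero_le (by omega : (0:Int) ≤ k)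
    have hk1 : 1 ≤ kN := by exact_mod_cast hk.1
    have hkq : kN < qN := by exact_mod_cast hk.2
    have hb1 : kN * iN < L - iN + 1 := by
      have h5 : (kN + 1) * iN ≤ qN * iN := Nat.mul_le_mul_right iN (by omega)
      have h6 : (kN + 1) * iN = kN * iN + iN := by ring
      omega
    have hb2 : (kN - 1) * iN < L - iN + 1 := by
      have h5 : (kN - 1) * iN ≤ kN * iN := Nat.mul_le_mul_right iN (Nat.sub_le _ _)
      omega
    have e1 : ((kN : Nat) : Int) * ((iN : Nat) : Int) = ((kN * iN : Nat) : Int) := by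
      push_cast; ring
    have e2 : (((kN : Nat) : Int) - 1) * ((iN : Nat) : Int) = (((kN - 1) * iN : Nat) : Int) := by
      push_cast [hk1]; ring
    rw [e1, e2, PySem.List.pyGetD_natCast, PySem.List.pyGetD_natCast,
      PySem.List.getD_map_range _ _ _ _ hb1, PySem.List.getD_map_range _ _ _ _ hb2]
    by_cases hcc : pvChunk s.toList iN (kN - 1) = pvChunk s.toList iN kN
    · rw [if_pos ((pvCond_iff s.toList iN kN hk1).2 hcc)]
      simp only [pvBS, Int.toNat_natCast]
      rw [if_pos hcc]
    · rw [if_neg (fun h => hcc ((pvCond_iff s.toList iN kN hk1).1 h))]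
      simp only [pvBS, Int.toNat_natCast]
      rw [if_neg hcc]
      rfl)]
  -- the parallel invariant at u = qN
  obtain ⟨P1, P2, P3, P4⟩ :=
    pvPar s.toList iN hiN ((qN : Nat) : Int) ((rN : Nat) : Int) hmcast ((qN : Nat) : Int)
      (by exact_mod_cast Nat.one_le_iff_ne_zero.2 (by omega)) (le_refl _)
  set ST := (PySem.List.pyRange 1 ((qN : Nat) : Int) 1).foldl (pvAS s.toList iN)
      ([], pvChunk s.toList iN 0, 1) with hST
  set BST := (PySem.List.pyRange 1 ((qN : Nat) : Int) 1).foldl (pvBS s.toList iN)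
      (((rN : Nat) : Int), 1) with hBST
  rw [show (((qN : Nat) : Int) - 1).toNat = qN - 1 by omega] at P2
  have hfull' : (qN - 1) * iN + iN ≤ L := by
    have h6 : (qN - 1) * iN + iN = qN * iN := by
      have h7 : qN - 1 + 1 = qN := by omega
      calc (qN - 1) * iN + iN = (qN - 1 + 1) * iN := by ring
      _ = qN * iN := by rw [h7]
    omega
  have hplen : ST.2.1.length = iN := by rw [P2, pvChunk_length]; omega
  by_cases hr : rN = 0
  · -- no partial tail chunk: the A range is k = 1 .. qN - 1
    have hm'0 : (((L : Nat) : Int) - 1) / ((iN : Nat) : Int) = ((qN : Nat) : Int) - 1 := by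
      rw [show ((L : Nat) : Int) - 1 = (((iN : Nat) : Int) - 1) + (-1 + ((qN : Nat) : Int)) * ((iN : Nat) : Int) by
        rw [hcast, hr]; push_cast; ring]
      rw [Int.add_mul_ediv_right _ _ hne0, Int.ediv_eq_zero_of_lt (by omega) (by omega)]
      ring
    rw [hm'0, show ((qN : Nat) : Int) - 1 + 1 = ((qN : Nat) : Int) by ring]
    rw [← hST]
    by_cases hc1 : ST.2.2 = 1
    · have hB2 : BST.2 = 1 := by rw [← P3, hc1]
      rw [if_pos hc1, if_neg (by rw [hB2]; norm_num : ¬(1 : Int) < BST.2)]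
      rw [List.length_append, hplen]
      have hr0 : ((rN : Nat) : Int) = 0 := by exact_mod_cast hr
      simp only [Nat.cast_add]
      omega
    · have hgt : 1 < BST.2 := lt_of_le_of_ne P4 (fun h => hc1 (by rw [P3, ← h]))
      rw [if_neg hc1, if_pos hgt, ← P3]
      rw [List.length_append, List.length_append, hplen]
      have hr0 : ((rN : Nat) : Int) = 0 := by exact_mod_cast hr
      simp only [Nat.cast_add]
      omega
  · -- partial tail chunk: the A range is k = 1 .. qN, the last chunk has length rN < iN
    have hm'1 : (((L : Nat) : Int) - 1) / ((iN : Nat) : Int) = ((qN : Nat) : Int) := by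
      rw [show ((L : Nat) : Int) - 1 = (((rN : Nat) : Int) - 1) + ((qN : Nat) : Int) * ((iN : Nat) : Int) by
        rw [hcast]; ring]
      rw [Int.add_mul_ediv_right _ _ hne0]
      rw [Int.ediv_eq_zero_of_lt (by omega) (by omega)]
      ring
    rw [hm'1]
    rw [PySem.List.pyRange_one_succ_right (by exact_mod_cast Nat.one_le_iff_ne_zero.2 (by omega)),
      List.foldl_append]
    simp only [List.foldl_cons, List.foldl_nil]
    rw [← hST]
    have hqlen : (pvChunk s.toList iN qN).length = rN := by rw [pvChunk_length]; omega
    have hne : ST.2.1 ≠ pvChunk s.toList iN qN := by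
      intro he
      have := congrArg List.length he
      rw [hplen, hqlen] at this
      omega
    simp only [pvAS, Int.toNat_natCast]
    rw [if_neg hne]
    dsimp only
    rw [if_pos rfl]
    by_cases hc1 : ST.2.2 = 1
    · have hB2 : BST.2 = 1 := by rw [← P3, hc1]
      rw [if_pos hc1, if_neg (by rw [hB2]; norm_num : ¬(1 : Int) < BST.2)]
      rw [List.length_append, List.length_append, hplen, hqlen]
      simp only [Nat.cast_add]
      omega
    · have hgt : 1 < BST.2 := lt_of_le_of_ne P4 (fun h => hc1 (by rw [P3, ← h]))
      rw [if_neg hc1, if_pos hgt, ← P3]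
      rw [List.length_append, List.length_append, List.length_append, hplen, hqlen]
      simp only [Nat.cast_add]
      omega
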